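-- pv_equiv track=rewrite | github.com/everycas/sh5query_mod | sh5query.py | num_to_guid
-- ===== SOURCE A (Python) =====
-- def num_to_guid(num: str):
--     """ Convert any number to guid """
--     zero_add = ''
--     guid_mask = '{00000000-0000-0000-0000-'
--     postfix = '}'
--     if len(num) < 12:
--         diff = 12 - len(num)  # 6
--         for _ in range(diff):
--             zero_add += '0'
--             code = zero_add + num
--     elif len(num) > 12:
--         diff = len(num) - 12
--         code = num[diff:]
--     else:
--         code = num
--
--     guid = guid_mask + code + postfix
--     return guid  # make
-- ===== SOURCE B (Python) =====
-- def num_to_guid(num: str):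
--     """ Convert any number to guid """
--     code = ('0' * 12 + num)[-12:]
--     return '{00000000-0000-0000-0000-' + code + '}'
-- ===== Notes on version B (the rewrite author's own statement) =====
-- stated objective: simpler
-- what changed: Replaces the three-way length branch and the zero-appending loop with a single closed-form pad-then-take-last-12 slice.
import Mathlib
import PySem

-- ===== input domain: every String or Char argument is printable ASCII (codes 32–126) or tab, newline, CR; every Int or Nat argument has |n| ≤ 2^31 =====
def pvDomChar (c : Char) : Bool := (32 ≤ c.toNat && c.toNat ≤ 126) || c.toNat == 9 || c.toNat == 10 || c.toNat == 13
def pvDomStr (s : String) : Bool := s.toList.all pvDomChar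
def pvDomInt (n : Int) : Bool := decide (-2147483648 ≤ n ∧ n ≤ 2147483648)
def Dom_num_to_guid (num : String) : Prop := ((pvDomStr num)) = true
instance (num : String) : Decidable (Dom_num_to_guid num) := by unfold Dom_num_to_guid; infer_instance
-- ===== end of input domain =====

-- B replaces A's three-way branch and zero-appending loop by one closed-form slice ('0'*12 + num)[-12:]; objective: simpler.

-- ===== PORT A =====
def num_to_guid (num : String) : String :=
  let n := num.toList
  let guid_mask := "{00000000-0000-0000-0000-".toList
  let code :=
    if n.length < 12 then
      -- for _ in range(diff): zero_add += '0'; code = zero_add + num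
      -- state = (zero_add, code); diff ≥ 1, so code's initial [] is always overwritten
      let diff := 12 - n.length
      ((List.range diff).foldl
        (fun (st : List Char × List Char) _ =>
          let za := st.1 ++ ['0']; (za, za ++ n)) (([] : List Char), ([] : List Char))).2
    else if n.length > 12 then
      PySem.List.slice n (some ((n.length : Int) - 12)) none
    else n
  String.ofList (guid_mask ++ code ++ ['}'])

-- ===== PORT B =====
def num_to_guid_alt (num : String) : String :=
  let code := PySem.List.slice (PySem.List.pyRepeat ['0'] 12 ++ num.toList) (some (-12 : Int)) none
  String.ofList ("{00000000-0000-0000-0000-".toList ++ code ++ ['}'])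

-- ===== PRECONDITION & SPEC =====
def Spec_num_to_guid (num : String) (out : String) : Prop := out = num_to_guid_alt num
instance (num : String) (out : String) : Decidable (Spec_num_to_guid num out) := by unfold Spec_num_to_guid; infer_instance

-- ===== CLAIM (what is proved, stated in full; the proofs are below) =====
def Claim_equal_num_to_guid : Prop := ∀ (num : String), Dom_num_to_guid num → Spec_num_to_guid num (num_to_guid num)

-- ===== LEMMAS AND PROOFS =====

lemma num_to_guid_loop (d : Nat) (n : List Char) :
    ((List.range d).foldl
      (fun (st : List Char × List Char) _ =>
        let za := st.1 ++ ['0']; (za, za ++ n)) (([] : List Char), ([] : List Char))) =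
    (List.replicate d '0', if d = 0 then [] else List.replicate d '0' ++ n) := by
  induction d with
  | zero => simp
  | succ d ih =>
    rw [List.range_succ, List.foldl_append, ih]
    simp [List.replicate_succ' (n := d)]

lemma num_to_guid_code (n : List Char) :
    (if n.length < 12 then
      ((List.range (12 - n.length)).foldl
        (fun (st : List Char × List Char) _ =>
          let za := st.1 ++ ['0']; (za, za ++ n)) (([] : List Char), ([] : List Char))).2
    else if n.length > 12 then
      PySem.List.slice n (some ((n.length : Int) - 12)) none
    else n) =
    PySem.List.slice (PySem.List.pyRepeat ['0'] 12 ++ n) (some (-12 : Int)) none := by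
  rw [show (-12 : Int) = -((12 : Nat) : Int) by norm_num,
      PySem.List.slice_from_neg_natCast _ 12 (by omega)]
  have hrep : PySem.List.pyRepeat ['0'] 12 = List.replicate 12 '0' := by
    simp [PySem.List.pyRepeat_singleton]
  rw [hrep]
  have hlen : (List.replicate 12 '0' ++ n).length - 12 = n.length := by simp
  rw [hlen]
  rw [List.drop_append, List.drop_replicate]
  by_cases h : n.length < 12
  · rw [if_pos h, num_to_guid_loop, if_neg (by omega)]
    simp [Nat.sub_eq_zero_of_le h.le]
  · rw [if_neg h]
    by_cases hg : n.length > 12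
    · rw [if_pos hg, PySem.List.slice_from,
        show 12 - n.length = 0 by omega, List.replicate_zero, List.nil_append]
      · congr 1
        simp only [List.length_replicate]
        omega
      · omega
    · have h12 : n.length = 12 := by omega
      rw [if_neg hg]
      simp [h12]

-- ===== VERDICT (by name: the statement is the Claim_ definition above) =====
theorem num_to_guid_spec : Claim_equal_num_to_guid := by
  intro num _
  show _ = _
  unfold num_to_guid num_to_guid_alt
  simp only []
  rw [num_to_guid_code]
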